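-- pv_equiv track=rewrite | github.com/mabau/lbmpy | lbmpy/advanced_streaming/communication.py | _extend_dir
-- ===== SOURCE A (Python) =====
-- def _extend_dir(direction):
--     if len(direction) == 0:
--         yield tuple()
--     elif direction[0] == 0:
--         for d in [-1, 0, 1]:
--             for rest in _extend_dir(direction[1:]):
--                 yield (d, ) + rest
--     else:
--         for rest in _extend_dir(direction[1:]):
--             yield (direction[0], ) + rest
-- ===== SOURCE B (Python) =====
-- import itertools
--
-- def _extend_dir(direction):
--     choices = [(-1, 0, 1) if c == 0 else (c,) for c in direction]
--     yield from itertools.product(*choices)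
-- ===== Notes on version B (the rewrite author's own statement) =====
-- stated objective: idiomatic
-- what changed: Replaces the recursive per-component generator descent (which rebuilds each output tuple by repeated tuple concatenation at every recursion level) with precomputed per-component option lists fed to itertools.product, preserving order and tuple output.
import Mathlib
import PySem

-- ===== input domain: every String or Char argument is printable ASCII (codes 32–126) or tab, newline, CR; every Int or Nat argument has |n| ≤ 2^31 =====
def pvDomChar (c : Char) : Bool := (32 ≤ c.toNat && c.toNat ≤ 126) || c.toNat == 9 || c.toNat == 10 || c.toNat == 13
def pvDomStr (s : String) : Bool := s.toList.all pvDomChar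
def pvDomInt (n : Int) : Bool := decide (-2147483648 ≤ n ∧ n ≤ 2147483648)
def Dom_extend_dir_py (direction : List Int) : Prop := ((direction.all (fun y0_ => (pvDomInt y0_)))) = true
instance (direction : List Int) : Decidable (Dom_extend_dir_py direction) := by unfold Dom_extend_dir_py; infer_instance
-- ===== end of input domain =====

-- B replaces A's recursive per-component descent by precomputed option lists combined
-- with an iterative Cartesian product (itertools.product); same order and values.

-- ===== PORT A =====
-- literal port of the recursive generator: each yielded tuple is a List Int,
-- yields collected in generator order.
def extend_dir_py : List Int → List (List Int)
  | [] => [[]]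
  | d :: rest =>
    if d = 0 then
      ([-1, 0, 1] : List Int).flatMap (fun x => (extend_dir_py rest).map (fun r => x :: r))
    else
      (extend_dir_py rest).map (fun r => d :: r)

-- ===== PORT B =====
-- choices list as in Source B; itertools.product ported as the standard right fold
-- (first component varies slowest, matching product's odometer order).
def pvProduct (choices : List (List Int)) : List (List Int) :=
  choices.foldr (fun opts acc => opts.flatMap (fun x => acc.map (fun r => x :: r))) [[]]

def extend_dir_py_alt (direction : List Int) : List (List Int) :=
  pvProduct (direction.map (fun c => if c = 0 then [-1, 0, 1] else [c]))

-- ===== PRECONDITION & SPEC =====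
def Spec_extend_dir_py (direction : List Int) (out : List (List Int)) : Prop := out = extend_dir_py_alt direction
instance (direction : List Int) (out : List (List Int)) : Decidable (Spec_extend_dir_py direction out) := by unfold Spec_extend_dir_py; infer_instance

-- ===== CLAIM (what is proved, stated in full; the proofs are below) =====
def Claim_equal_extend_dir_py : Prop := ∀ (direction : List Int), Dom_extend_dir_py direction → Spec_extend_dir_py direction (extend_dir_py direction)

-- ===== LEMMAS AND PROOFS =====
theorem extend_dir_eq (direction : List Int) :
    extend_dir_py direction = extend_dir_py_alt direction := by
  induction direction with
  | nil => rfl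
  | cons d rest ih =>
    simp only [extend_dir_py, extend_dir_py_alt, pvProduct, List.map_cons, List.foldr_cons] at *
    by_cases h : d = 0
    · simp [h, ih]
    · simp [h, ih, List.flatMap]

-- ===== VERDICT (by name: the statement is the Claim_ definition above) =====
theorem extend_dir_py_spec : Claim_equal_extend_dir_py := by
  intro direction _
  exact extend_dir_eq direction
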